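-- pv_equiv track=rewrite | github.com/seilk/Algorithm-PS | BAEKJOON/놀라운 문자열_1972.py | isSuprise
-- ===== SOURCE A (Python) =====
-- from collections import defaultdict as dfd
--
-- def isSuprise(s, p):
--   k = dfd(int)
--   l = len(s)
--   for i in range(l-(p+1)):
--     ns = s[i] + s[i + p + 1]
--     if k[ns] == 0:
--       k[ns] += 1
--     else:
--       return False
--   return True
-- ===== SOURCE B (Python) =====
-- def isSuprise(s, p):
--   gap = p + 1
--   codes = sorted(1114112 * ord(s[i]) + ord(s[i + gap]) for i in range(len(s) - gap))
--   return all(a != b for a, b in zip(codes, codes[1:]))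
-- ===== Notes on version B (the rewrite author's own statement) =====
-- stated objective: alternative
-- what changed: B detects a duplicate gap-pair by sorting instead of hashing: it encodes each pair s[i],s[i+p+1] as the integer 1114112*ord(c1)+ord(c2), sorts the codes and scans adjacent entries for an equal neighbour, replacing A's incrementally maintained seen-dict with early exit.
-- outside the precondition, e.g. on isSuprise('aaaa', -3): A returns False, B raises IndexError
import Mathlib
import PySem

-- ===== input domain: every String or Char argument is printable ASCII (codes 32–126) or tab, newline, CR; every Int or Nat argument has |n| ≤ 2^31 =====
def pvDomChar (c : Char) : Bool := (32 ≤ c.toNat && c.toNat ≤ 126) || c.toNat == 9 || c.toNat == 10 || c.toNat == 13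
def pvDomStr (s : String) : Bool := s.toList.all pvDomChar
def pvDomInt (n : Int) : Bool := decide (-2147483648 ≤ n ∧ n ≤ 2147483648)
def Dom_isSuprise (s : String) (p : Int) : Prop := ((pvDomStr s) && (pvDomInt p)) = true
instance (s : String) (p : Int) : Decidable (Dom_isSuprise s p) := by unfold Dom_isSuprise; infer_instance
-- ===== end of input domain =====

-- B replaces A's incremental seen-dict with sort-based duplicate detection: each gap pair is
-- encoded as an integer, the codes are sorted and adjacent entries compared; same result,
-- a genuinely different algorithm (O(n log n) instead of A's hashed O(n)).

-- ===== PORT A =====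
-- The two-character string s[i] + s[i+p+1] is represented by its character list [c1, c2]
-- (PySem convention: string values are handled on the List Char side); keys are only compared
-- for equality, which agrees with Python string equality.
-- Inside Pre_ (-1 ≤ p) every index the loop touches is in range, so pyGetD's default is never
-- read; outside Pre_ the Python raises IndexError (possibly after returning False early) and
-- nothing is claimed.
def pvLoopA (cs : List Char) (p : Int) (idxs : List Int) (k : PySem.Dict (List Char) Int) : Bool :=
  match idxs with
  | [] => true
  | i :: rest =>
    let ns : List Char := [PySem.List.pyGetD cs i ' ', PySem.List.pyGetD cs (i + p + 1) ' ']
    if k.getD ns 0 = 0 then pvLoopA cs p rest (k.insert ns 1)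
    else false

def isSuprise (s : String) (p : Int) : Bool :=
  let l : Int := PySem.Str.len s
  pvLoopA s.toList p (PySem.List.pyRange 0 (l - (p + 1)) 1) PySem.Dict.empty

-- ===== PORT B =====
-- ord(c) is c.toNat cast to Int; 1114112 * ord(c1) + ord(c2) is the pair's code.
def isSuprise_alt (s : String) (p : Int) : Bool :=
  let cs := s.toList
  let gap := p + 1
  let codes : List Int :=
    PySem.List.sorted
      ((PySem.List.pyRange 0 (PySem.Str.len s - gap) 1).map
        (fun i => 1114112 * ((PySem.List.pyGetD cs i ' ').toNat : Int)
                  + ((PySem.List.pyGetD cs (i + gap) ' ').toNat : Int)))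
      (fun x => x) false
  (codes.zip (PySem.List.slice codes (some 1) none)).all (fun ab => !(ab.1 == ab.2))

-- ===== PRECONDITION & SPEC =====
-- Pre_ excludes p < -1, where A's loop runs past the end of s: the Python A eventually hits
-- IndexError there, though on some such inputs it returns False first via negative-index
-- wraparound (e.g. s='aaaa', p=-3), while B's eager pair construction raises IndexError
-- before any comparison; so those inputs are excluded rather than matched.
def Pre_isSuprise (s : String) (p : Int) : Prop := -1 ≤ p
instance (s : String) (p : Int) : Decidable (Pre_isSuprise s p) := by unfold Pre_isSuprise; infer_instance
def pvWitness_isSuprise : String × Int := ("ABAB", 1)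
def Spec_isSuprise (s : String) (p : Int) (out : Bool) : Prop := out = isSuprise_alt s p
instance (s : String) (p : Int) (out : Bool) : Decidable (Spec_isSuprise s p out) := by unfold Spec_isSuprise; infer_instance

-- ===== CLAIM (what is proved, stated in full; the proofs are below) =====
def Claim_equal_isSuprise : Prop := ∀ (s : String) (p : Int), Dom_isSuprise s p → Pre_isSuprise s p → Spec_isSuprise s p (isSuprise s p)

-- ===== LEMMAS AND PROOFS =====

-- A's early-exit loop from any dict k succeeds iff the pairs it would build are all distinct
-- and none of them is already recorded in k.
theorem pvLoopA_iff (cs : List Char) (p : Int) (idxs : List Int) (k : PySem.Dict (List Char) Int) :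
    pvLoopA cs p idxs k = true ↔
      ((idxs.map (fun i => ([PySem.List.pyGetD cs i ' ', PySem.List.pyGetD cs (i + p + 1) ' '] : List Char))).Nodup
       ∧ ∀ i ∈ idxs, k.getD ([PySem.List.pyGetD cs i ' ', PySem.List.pyGetD cs (i + p + 1) ' '] : List Char) 0 = 0) := by
  induction idxs generalizing k with
  | nil => simp [pvLoopA]
  | cons i rest ih =>
    simp only [pvLoopA, List.map_cons, List.nodup_cons, List.mem_cons]
    by_cases h0 : k.getD ([PySem.List.pyGetD cs i ' ', PySem.List.pyGetD cs (i + p + 1) ' '] : List Char) 0 = 0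
    · rw [if_pos h0, ih]
      constructor
      · rintro ⟨hnd, hall⟩
        refine ⟨⟨?_, hnd⟩, ?_⟩
        · intro hmem
          obtain ⟨j, hj, hje⟩ := List.mem_map.mp hmem
          have := hall _ hj
          rw [hje, PySem.Dict.getD_insert, if_pos rfl] at this
          simp at this
        · rintro j (rfl | hj)
          · exact h0
          · have := hall _ hj
            rw [PySem.Dict.getD_insert] at this
            split_ifs at this with he
            · simp at this
            · exact this
      · rintro ⟨⟨hnotmem, hnd⟩, hall⟩
        refine ⟨hnd, ?_⟩
        intro j hj
        rw [PySem.Dict.getD_insert]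
        split_ifs with he
        · exact absurd (List.mem_map.mpr ⟨j, hj, he⟩) hnotmem
        · exact hall _ (Or.inr hj)
    · rw [if_neg h0]
      simp only [Bool.false_eq_true, false_iff, not_and]
      intro _ hall
      exact h0 (hall _ (Or.inl rfl))

-- every character's code point is below 0x110000
theorem pvCharLt (c : Char) : c.toNat < 1114112 := by
  have h := c.valid
  simp [UInt32.isValidChar, Nat.isValidChar] at h
  have h2 : c.toNat = c.val.toNat := rfl
  omega

-- characters with the same code point are equal
theorem pvCharEqOfToNat {a b : Char} (h : a.toNat = b.toNat) : a = b := by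
  apply Char.ext
  exact UInt32.toNat_inj.mp h

-- the integer encoding of an ordered character pair is injective
theorem pvCodeInj (a b c d : Char) :
    1114112 * (a.toNat : Int) + (b.toNat : Int) = 1114112 * (c.toNat : Int) + (d.toNat : Int)
      ↔ a = c ∧ b = d := by
  constructor
  · intro h
    have ha := pvCharLt a; have hb := pvCharLt b; have hc := pvCharLt c; have hd := pvCharLt d
    have h1 : a.toNat = c.toNat ∧ b.toNat = d.toNat := by omega
    exact ⟨pvCharEqOfToNat h1.1, pvCharEqOfToNat h1.2⟩
  · rintro ⟨rfl, rfl⟩; rfl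

-- B's adjacent-scan over a zip is the ≠-chain condition
theorem pvZipAll_iff (l : List Int) :
    (l.zip l.tail).all (fun ab => !(ab.1 == ab.2)) = true ↔ l.IsChain (· ≠ ·) := by
  induction l with
  | nil => simp
  | cons x t ih =>
    cases t with
    | nil => simp
    | cons y u => simp_all [List.isChain_cons_cons]

-- on a weakly sorted list, no equal neighbours ⟺ no duplicates at all
theorem pvChainNe_iff_nodup (l : List Int) (h : l.Pairwise (· ≤ ·)) :
    l.IsChain (· ≠ ·) ↔ l.Nodup := by
  rw [List.isChain_iff_getElem]
  constructor
  · intro hc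
    have hlt : l.IsChain (· < ·) := by
      rw [List.isChain_iff_getElem]
      intro i hi
      exact lt_of_le_of_ne ((List.pairwise_iff_getElem.mp h) i (i+1) (by omega) (by omega) (by omega)) (hc i hi)
    exact (List.isChain_iff_pairwise.mp hlt).imp ne_of_lt
  · intro hn i hi
    exact (List.pairwise_iff_getElem.mp hn) i (i+1) (by omega) (by omega) (by omega)

-- the pair of characters at gap p+1 and its integer code determine each other
theorem pvKeyIff (cs : List Char) (p i j : Int) :
    (1114112 * ((PySem.List.pyGetD cs i ' ').toNat : Int) + ((PySem.List.pyGetD cs (i + p + 1) ' ').toNat : Int)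
      = 1114112 * ((PySem.List.pyGetD cs j ' ').toNat : Int) + ((PySem.List.pyGetD cs (j + p + 1) ' ').toNat : Int))
      ↔ ([PySem.List.pyGetD cs i ' ', PySem.List.pyGetD cs (i + p + 1) ' '] : List Char)
        = [PySem.List.pyGetD cs j ' ', PySem.List.pyGetD cs (j + p + 1) ' '] := by
  rw [pvCodeInj]; simp

theorem isSuprise_eq (s : String) (p : Int) : isSuprise s p = isSuprise_alt s p := by
  simp only [isSuprise, isSuprise_alt, PySem.List.slice_from_one, ← add_assoc]
  rw [Bool.eq_iff_iff, pvLoopA_iff, pvZipAll_iff,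
      pvChainNe_iff_nodup _ (PySem.List.sorted_pairwise _ _),
      (PySem.List.sorted_perm _ _ _).nodup_iff]
  simp only [PySem.Dict.getD_empty, implies_true, and_true]
  simp only [List.Nodup, List.pairwise_map]
  constructor
  · exact fun h => h.imp fun hne he => hne ((pvKeyIff s.toList p _ _).mp he)
  · exact fun h => h.imp fun hne he => hne ((pvKeyIff s.toList p _ _).mpr he)

-- ===== VERDICT (by name: the statement is the Claim_ definition above) =====
theorem isSuprise_spec : Claim_equal_isSuprise := by
  intro s p _ _
  unfold Spec_isSuprise
  exact isSuprise_eq s p
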